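-- pv_equiv track=rewrite | github.com/TZEmrichMills/BACSearcher | BACSearcher.py | mask_dinucleotides
-- ===== SOURCE A (Python) =====
-- def mask_dinucleotides(flank):
--
--     num_dinucs = 5
--     flanklist = list(flank)
--     for i in range(len(flank)-num_dinucs*2+1):
--         dinuc = flank[i:i+2]
--         if 'N' in dinuc:
--             continue
--         pos = [i, i+1]
--         for j in range(i+2, len(flank), 2):
--             if dinuc == flank[j:j+2]:
--                 pos.append(j)
--                 pos.append(j+1)
--             else:
--                 break
--         if len(pos) >= num_dinucs*2:
--             for p in pos:
--                 flanklist[p] = 'N'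
--     flank = ''.join(flanklist)
--     return flank
-- ===== SOURCE B (Python) =====
-- def mask_dinucleotides(flank):
--     n = len(flank)
--     # run[i] = number of consecutive repeats of the dinucleotide starting at i
--     run = [1] * n
--     for i in range(n - 4, -1, -1):
--         if flank[i] == flank[i + 2] and flank[i + 1] == flank[i + 3]:
--             run[i] = run[i + 2] + 1
--     out = []
--     cover = 0
--     for p in range(n):
--         if p + 1 < n and run[p] >= 5 and flank[p] != 'N' and flank[p + 1] != 'N':
--             cover = max(cover, p + 2 * run[p])
--         out.append('N' if p < cover else flank[p])
--     return ''.join(out)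
-- ===== Notes on version B (the rewrite author's own statement) =====
-- stated objective: faster
-- what changed: A rescans the whole repeat chain from every start position (quadratic on long dinucleotide runs) and writes masks into a char list; B computes all run lengths in one right-to-left DP pass and masks via a single forward interval-union sweep, O(n) total.
import Mathlib
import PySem

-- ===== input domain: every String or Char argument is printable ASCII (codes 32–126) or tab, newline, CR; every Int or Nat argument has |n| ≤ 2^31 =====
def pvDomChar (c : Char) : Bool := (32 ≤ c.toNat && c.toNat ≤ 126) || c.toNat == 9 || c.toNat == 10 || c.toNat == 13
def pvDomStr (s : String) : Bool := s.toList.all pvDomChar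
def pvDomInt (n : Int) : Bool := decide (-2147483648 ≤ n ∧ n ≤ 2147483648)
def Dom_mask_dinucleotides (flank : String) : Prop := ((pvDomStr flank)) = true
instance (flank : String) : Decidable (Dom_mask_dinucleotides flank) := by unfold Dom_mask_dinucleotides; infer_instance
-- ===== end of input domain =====

-- B replaces A's quadratic rescan of every start position by a right-to-left run-length
-- DP plus a single forward interval-union sweep (objective: faster, asymptotic O(n) vs O(n^2)).

-- ===== PORT A =====
-- inner 'for j in range(i+2, len(flank), 2): … else: break' loop
def pvAInner (cs dinuc : List Char) (js : List Int) (pos : List Int) : List Int :=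
  match js with
  | [] => pos
  | j :: rest =>
    if dinuc = PySem.List.slice cs (some j) (some (j + 2)) then
      pvAInner cs dinuc rest ((pos ++ [j]) ++ [j + 1])
    else pos

-- one iteration of the outer 'for i in range(len(flank)-num_dinucs*2+1)' loop
def pvAStep (cs : List Char) (fl : List Char) (i : Int) : List Char :=
  let dinuc := PySem.List.slice cs (some i) (some (i + 2))
  if 'N' ∈ dinuc then fl
  else
    let pos := pvAInner cs dinuc (PySem.List.pyRange (i + 2) (PySem.List.len cs) 2) [i, i + 1]
    if 5 * 2 ≤ PySem.List.len pos then
      pos.foldl (fun fl2 p => PySem.List.pySetD fl2 p 'N') fl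
    else fl

def mask_dinucleotides (flank : String) : String :=
  let cs := flank.toList
  String.ofList ((PySem.List.pyRange 0 (PySem.List.len cs - 5 * 2 + 1) 1).foldl (pvAStep cs) cs)

-- ===== PORT B =====
-- 'for i in range(n-4, -1, -1): if flank[i]==flank[i+2] and flank[i+1]==flank[i+3]: run[i] = run[i+2]+1'
def pvBStepRun (cs : List Char) (run : List Int) (i : Int) : List Int :=
  if PySem.List.pyGetD cs i ' ' = PySem.List.pyGetD cs (i + 2) ' ' ∧
     PySem.List.pyGetD cs (i + 1) ' ' = PySem.List.pyGetD cs (i + 3) ' ' then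
    PySem.List.pySetD run i (PySem.List.pyGetD run (i + 2) 0 + 1)
  else run

-- one iteration of 'for p in range(n)': update cover, append masked or original char
def pvBStepOut (cs : List Char) (run : List Int) (st : List Char × Int) (p : Int) : List Char × Int :=
  let cover :=
    if p + 1 < PySem.List.len cs ∧ 5 ≤ PySem.List.pyGetD run p 0 ∧
       PySem.List.pyGetD cs p ' ' ≠ 'N' ∧ PySem.List.pyGetD cs (p + 1) ' ' ≠ 'N' then
      max st.2 (p + 2 * PySem.List.pyGetD run p 0)
    else st.2
  (st.1 ++ [if p < cover then 'N' else PySem.List.pyGetD cs p ' '], cover)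

def mask_dinucleotides_alt (flank : String) : String :=
  let cs := flank.toList
  let n := PySem.List.len cs
  let run := (PySem.List.pyRange (n - 4) (-1) (-1)).foldl (pvBStepRun cs) (PySem.List.pyRepeat [(1 : Int)] n)
  let st := (PySem.List.pyRange 0 n 1).foldl (pvBStepOut cs run) ([], 0)
  String.ofList st.1

-- ===== PRECONDITION & SPEC =====
def Spec_mask_dinucleotides (flank : String) (out : String) : Prop := out = mask_dinucleotides_alt flank
instance (flank : String) (out : String) : Decidable (Spec_mask_dinucleotides flank out) := by unfold Spec_mask_dinucleotides; infer_instance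

-- ===== CLAIM (what is proved, stated in full; the proofs are below) =====
def Claim_equal_mask_dinucleotides : Prop := ∀ (flank : String), Dom_mask_dinucleotides flank → Spec_mask_dinucleotides flank (mask_dinucleotides flank)

-- ===== LEMMAS AND PROOFS =====

-- pvCnt l i = number of consecutive repeats of the dinucleotide at position i
def pvCnt (l : List Char) (i : Nat) : Nat :=
  if h : i + 4 ≤ l.length ∧ l.getD i ' ' = l.getD (i + 2) ' ' ∧ l.getD (i + 1) ' ' = l.getD (i + 3) ' ' then
    pvCnt l (i + 2) + 1
  else 1
termination_by l.length - i
decreasing_by omega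

-- pvCntD: A's inner count, comparing each pair against a fixed dinucleotide (d0, d1)
def pvCntD (l : List Char) (d0 d1 : Char) (j : Nat) : Nat :=
  if h : j + 2 ≤ l.length ∧ l.getD j ' ' = d0 ∧ l.getD (j + 1) ' ' = d1 then
    pvCntD l d0 d1 (j + 2) + 1
  else 0
termination_by l.length - j
decreasing_by omega

-- qualifying start: an in-range non-N dinucleotide repeated at least 5 times
def pvQb (l : List Char) (i : Nat) : Bool :=
  decide (i + 2 ≤ l.length ∧ l.getD i ' ' ≠ 'N' ∧ l.getD (i + 1) ' ' ≠ 'N' ∧ 5 ≤ pvCnt l i)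

-- position p is masked by some qualifying start i < M
def pvCovPart (l : List Char) (M : Nat) (p : Nat) : Bool :=
  (List.range M).any (fun i => pvQb l i && decide (i ≤ p ∧ p < i + 2 * pvCnt l i))

def pvCovB (l : List Char) (p : Nat) : Bool := pvCovPart l (p + 1) p

def pvPartial (l : List Char) (M : Nat) : List Char :=
  (List.range l.length).map (fun p => if pvCovPart l M p then 'N' else l.getD p ' ')

def pvSpecOut (l : List Char) : List Char :=
  (List.range l.length).map (fun p => if pvCovB l p then 'N' else l.getD p ' ')

-- running maximum of masked-interval right ends over starts < m
def pvCoverPre (l : List Char) : Nat → Nat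
  | 0 => 0
  | p + 1 => max (pvCoverPre l p) (if pvQb l p then p + 2 * pvCnt l p else 0)

theorem pv_cnt_le (l : List Char) (i : Nat) (h : i + 2 ≤ l.length) :
    i + 2 * pvCnt l i ≤ l.length := by
  unfold pvCnt
  split
  · rename_i hc
    have := pv_cnt_le l (i + 2) (by omega)
    omega
  · omega
termination_by l.length - i
decreasing_by omega

theorem pv_cnt_eq_one (l : List Char) (i : Nat) (h : l.length < i + 4) : pvCnt l i = 1 := by
  unfold pvCnt; rw [dif_neg]; omega

theorem pv_qb_imp (l : List Char) (i : Nat) (h : pvQb l i = true) : i + 10 ≤ l.length := by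
  simp only [pvQb, decide_eq_true_eq] at h
  have := pv_cnt_le l i h.1
  omega

theorem pv_map_getD_range (l : List Char) :
    (List.range l.length).map (fun q => l.getD q ' ') = l := by
  apply List.ext_getElem
  · simp
  · intro i h1 h2
    simp [List.getD_eq_getElem?_getD, List.getElem?_eq_getElem h2]
theorem pv_drop_take_two (l : List Char) (m : Nat) (h : m + 2 ≤ l.length) :
    (l.drop m).take 2 = [l.getD m ' ', l.getD (m + 1) ' '] := by
  apply List.ext_getElem
  · simp; omega
  · intro i h1 h2
    simp only [List.getElem_take, List.getElem_drop]
    simp at h2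
    match i, h2 with
    | 0, _ => simp [List.getD_eq_getElem?_getD, List.getElem?_eq_getElem (by omega : m < l.length)]
    | 1, _ => simp [List.getD_eq_getElem?_getD, List.getElem?_eq_getElem (by omega : m+1 < l.length)]
theorem pv_slice_pair (l : List Char) (m : Nat) (h : m + 2 ≤ l.length) :
    PySem.List.slice l (some (m : Int)) (some ((m : Int) + 2)) = [l.getD m ' ', l.getD (m + 1) ' '] := by
  have : ((m : Int) + 2) = ((m + 2 : Nat) : Int) := by push_cast; ring
  rw [this, PySem.List.slice_natCast]
  have : m + 2 - m = 2 := by omega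
  rw [this, pv_drop_take_two l m h]
theorem pv_slice_eq_pair_iff (l : List Char) (j : Nat) (d0 d1 : Char) :
    PySem.List.slice l (some (j : Int)) (some ((j : Int) + 2)) = [d0, d1] ↔
      (j + 2 ≤ l.length ∧ l.getD j ' ' = d0 ∧ l.getD (j + 1) ' ' = d1) := by
  constructor
  · intro h
    have hlen : (PySem.List.slice l (some (j : Int)) (some ((j : Int) + 2))).length = 2 := by
      rw [h]; rfl
    have : ((j : Int) + 2) = ((j + 2 : Nat) : Int) := by push_cast; ring
    rw [this, PySem.List.slice_natCast] at h hlen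
    simp at hlen
    have h2 : j + 2 ≤ l.length := by omega
    rw [show j+2-j = 2 from by omega] at h
    rw [pv_drop_take_two l j h2] at h
    simp at h
    exact ⟨h2, h.1, h.2⟩
  · rintro ⟨h2, e0, e1⟩
    rw [pv_slice_pair l j h2, e0, e1]
theorem pv_pyRange_two_nil (a b : Int) (h : b ≤ a) : PySem.List.pyRange a b 2 = [] := by
  rw [PySem.List.pyRange_of_pos _ _ (by norm_num)]
  rw [if_neg (by omega)]
  simp
theorem pv_pyRange_two_cons (a b : Int) (h : a < b) :
    PySem.List.pyRange a b 2 = a :: PySem.List.pyRange (a + 2) b 2 := by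
  rw [PySem.List.pyRange_of_pos _ _ (by norm_num), PySem.List.pyRange_of_pos _ _ (by norm_num)]
  rw [if_pos h]
  by_cases h2 : a + 2 < b
  · rw [if_pos h2]
    have e1 : ((b - a + 2 - 1) / 2).toNat = ((b - (a+2) + 2 - 1) / 2).toNat + 1 := by omega
    rw [e1, List.range_succ_eq_map]
    simp only [List.map_cons, List.map_map, Function.comp]
    congr 1
    · ring
    · apply List.map_congr_left
      intro k _
      simp
      ring
  · rw [if_neg h2]
    have e1 : ((b - a + 2 - 1) / 2).toNat = 1 := by omega
    rw [e1]
    simp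
theorem pv_range_two_shift (j c : Nat) :
    (List.range (2 * (c + 1))).map (fun t => ((j + t : Nat) : Int)) =
      [(j : Int), (j : Int) + 1] ++ (List.range (2 * c)).map (fun t => ((j + 2 + t : Nat) : Int)) := by
  rw [show 2 * (c + 1) = 2 + 2 * c from by ring, List.range_add, List.map_append, List.map_map]
  congr 1
  simp [List.range_succ_eq_map]
  intro a _
  omega

theorem pv_getD_map_range {α : Type} (f : Nat → α) (n q : Nat) (h : q < n) (d : α) :
    ((List.range n).map f).getD q d = f q := by
  simp [List.getD_eq_getElem?_getD, List.getElem?_range, h]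

theorem pv_inner_eq (l : List Char) (d0 d1 : Char) (j : Nat) (pos : List Int) :
    pvAInner l [d0, d1] (PySem.List.pyRange ((j : Int)) (l.length : Int) 2) pos =
      pos ++ (List.range (2 * pvCntD l d0 d1 j)).map (fun t => ((j + t : Nat) : Int)) := by
  by_cases hj : j < l.length
  · rw [pv_pyRange_two_cons _ _ (by exact_mod_cast hj)]
    unfold pvAInner
    by_cases hm : [d0, d1] = PySem.List.slice l (some (j : Int)) (some ((j : Int) + 2))
    · rw [if_pos hm]
      have hc := (pv_slice_eq_pair_iff l j d0 d1).mp hm.symm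
      have : ((j : Int) + 2) = ((j + 2 : Nat) : Int) := by push_cast; ring
      rw [this, pv_inner_eq l d0 d1 (j + 2) _]
      have hcnt : pvCntD l d0 d1 j = pvCntD l d0 d1 (j + 2) + 1 := by
        rw [pvCntD]; rw [dif_pos hc]
      rw [hcnt]
      rw [pv_range_two_shift j (pvCntD l d0 d1 (j + 2))]
      simp [List.append_assoc]
    · rw [if_neg hm]
      have hcnt : pvCntD l d0 d1 j = 0 := by
        rw [pvCntD, dif_neg]
        intro hc
        exact hm ((pv_slice_eq_pair_iff l j d0 d1).mpr hc).symm
      rw [hcnt]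
      simp
  · rw [pv_pyRange_two_nil _ _ (by exact_mod_cast Nat.le_of_not_lt hj)]
    have hcnt : pvCntD l d0 d1 j = 0 := by
      rw [pvCntD, dif_neg]; omega
    rw [hcnt]
    simp [pvAInner]
termination_by l.length - j
decreasing_by omega
theorem pv_cntD_pair (l : List Char) (d0 d1 : Char) (j : Nat) (h : j + 2 ≤ l.length)
    (e0 : l.getD j ' ' = d0) (e1 : l.getD (j + 1) ' ' = d1) :
    pvCntD l d0 d1 (j + 2) + 1 = pvCnt l j := by
  rw [pvCntD, pvCnt]
  by_cases hc : j + 4 ≤ l.length ∧ l.getD j ' ' = l.getD (j + 2) ' ' ∧ l.getD (j + 1) ' ' = l.getD (j + 3) ' '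
  · rw [dif_pos ⟨by omega, by rw [← hc.2.1, e0], by rw [show j+2+1 = j+3 from rfl, ← hc.2.2, e1]⟩, dif_pos hc]
    have := pv_cntD_pair l d0 d1 (j + 2) (by omega) (by rw [← hc.2.1, e0]) (by rw [show j+2+1 = j+3 from rfl, ← hc.2.2, e1])
    omega
  · rw [dif_neg, dif_neg hc]
    intro hh
    apply hc
    refine ⟨by omega, ?_, ?_⟩
    · rw [e0, hh.2.1]
    · rw [e1]; exact hh.2.2.symm
termination_by l.length - j
decreasing_by omega


theorem pv_mask_fold (fl : List Char) (j K : Nat) (h : j + K ≤ fl.length) :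
    ((List.range K).map (fun t => ((j + t : Nat) : Int))).foldl
        (fun fl2 p => PySem.List.pySetD fl2 p 'N') fl =
      (List.range fl.length).map (fun q => if j ≤ q ∧ q < j + K then 'N' else fl.getD q ' ') := by
  induction K with
  | zero =>
    have hq : ∀ q : Nat, ¬ (j ≤ q ∧ q < j + 0) := by omega
    simp only [List.range_zero, List.map_nil, List.foldl_nil, hq, if_false]
    exact (pv_map_getD_range fl).symm
  | succ K ih =>
    rw [List.range_succ, List.map_append, List.foldl_append, ih (by omega)]
    simp only [List.map_cons, List.map_nil, List.foldl_cons, List.foldl_nil,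
      PySem.List.pySetD_natCast]
    apply List.ext_getElem
    · simp
    · intro q h1 h2
      simp only [List.getElem_set, List.getElem_map, List.getElem_range]
      by_cases hq : j + K = q
      · rw [if_pos hq, if_pos (by omega)]
      · rw [if_neg hq]
        split_ifs <;> first | rfl | omega

theorem pv_covPart_succ (l : List Char) (m p : Nat) :
    pvCovPart l (m + 1) p =
      (pvCovPart l m p || (pvQb l m && decide (m ≤ p ∧ p < m + 2 * pvCnt l m))) := by
  simp [pvCovPart, List.range_succ]
theorem pv_partial_succ_of_not (l : List Char) (m : Nat) (hqb : pvQb l m = false) :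
    pvPartial l m = pvPartial l (m + 1) := by
  unfold pvPartial
  apply List.map_congr_left
  intro p _
  rw [pv_covPart_succ, hqb]
  simp

theorem pv_outer_step (l : List Char) (m : Nat) (h : m + 10 ≤ l.length) :
    pvAStep l (pvPartial l m) (m : Int) = pvPartial l (m + 1) := by
  have h2 : m + 2 ≤ l.length := by omega
  have hlen : (pvPartial l m).length = l.length := by simp [pvPartial]
  simp only [pvAStep, pv_slice_pair l m h2, PySem.List.len_eq]
  by_cases hN : 'N' ∈ [l.getD m ' ', l.getD (m + 1) ' ']
  · rw [if_pos hN]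
    apply pv_partial_succ_of_not
    simp only [List.mem_cons, List.not_mem_nil, or_false] at hN
    simp only [pvQb, decide_eq_false_iff_not]
    rintro ⟨-, hc0, hc1, -⟩
    rcases hN with hN | hN
    · exact hc0 hN.symm
    · exact hc1 hN.symm
  · rw [if_neg hN]
    simp only [List.mem_cons, List.not_mem_nil, or_false, not_or] at hN
    rw [show (m : Int) + 2 = ((m + 2 : Nat) : Int) from by push_cast; ring,
      pv_inner_eq l (l.getD m ' ') (l.getD (m + 1) ' ') (m + 2) [(m : Int), (m : Int) + 1]]
    have hpair := pv_cntD_pair l (l.getD m ' ') (l.getD (m + 1) ' ') m h2 rfl rfl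
    set c := pvCntD l (l.getD m ' ') (l.getD (m + 1) ' ') (m + 2) with hc
    have hshift := pv_range_two_shift m c
    rw [show ([(m : Int), (m : Int) + 1] : List Int) ++
          (List.range (2 * c)).map (fun t => ((m + 2 + t : Nat) : Int)) =
        (List.range (2 * (c + 1))).map (fun t => ((m + t : Nat) : Int)) from hshift.symm]
    simp only [List.nil_append, List.length_map, List.length_range, PySem.List.len_eq]
    by_cases hbig : 5 ≤ pvCnt l m
    · rw [if_pos (by push_cast; omega)]
      rw [pv_mask_fold (pvPartial l m) m (2 * (c + 1))
        (by rw [hlen]; have := pv_cnt_le l m h2; omega)]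
      have hqb : pvQb l m = true := by
        simp only [pvQb, decide_eq_true_eq]
        exact ⟨h2, fun e => hN.1 e.symm, fun e => hN.2 e.symm, hbig⟩
      apply List.ext_getElem
      · simp [pvPartial]
      · intro q h1 hq2
        have h1' : q < l.length := by simpa [pvPartial] using hq2
        simp only [pvPartial, List.getElem_map, List.getElem_range]
        rw [pv_covPart_succ, hqb, show m + 2 * (c + 1) = m + 2 * pvCnt l m from by omega]
        by_cases hcov : m ≤ q ∧ q < m + 2 * pvCnt l m
        · rw [if_pos hcov, decide_eq_true hcov]
          simp
        · rw [if_neg hcov, decide_eq_false hcov]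
          rw [pv_getD_map_range (fun p => if pvCovPart l m p = true then 'N' else l.getD p ' ') l.length q h1']
          simp
    · rw [if_neg (by push_cast; omega)]
      apply pv_partial_succ_of_not
      simp only [pvQb, decide_eq_false_iff_not]
      rintro ⟨-, -, -, hb⟩
      exact hbig hb

theorem pv_covPart_zero (l : List Char) (p : Nat) : pvCovPart l 0 p = false := by
  simp [pvCovPart]

theorem pv_partial_zero (l : List Char) : pvPartial l 0 = l := by
  simp only [pvPartial, pv_covPart_zero, Bool.false_eq_true, if_false]
  exact pv_map_getD_range l

theorem pv_outer_fold (l : List Char) (M : Nat) (h : M + 9 ≤ l.length) :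
    (PySem.List.pyRange 0 (M : Int) 1).foldl (pvAStep l) l = pvPartial l M := by
  induction M with
  | zero =>
    rw [show ((0 : Nat) : Int) = 0 from rfl, PySem.List.pyRange_one_eq_nil (le_refl _)]
    simp [pv_partial_zero]
  | succ M ih =>
    rw [show ((M + 1 : Nat) : Int) = (M : Int) + 1 from by push_cast; ring,
      PySem.List.pyRange_one_succ_right (by positivity), List.foldl_append,
      ih (by omega)]
    simp only [List.foldl_cons, List.foldl_nil]
    exact pv_outer_step l M (by omega)

theorem pv_covPart_final (l : List Char) (p : Nat) :
    pvCovPart l (l.length - 9) p = pvCovB l p := by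
  rw [Bool.eq_iff_iff]
  simp only [pvCovPart, pvCovB, List.any_eq_true, List.mem_range, Bool.and_eq_true,
    decide_eq_true_eq]
  constructor
  · rintro ⟨i, hi, hq, hle, hlt⟩
    exact ⟨i, by omega, hq, hle, hlt⟩
  · rintro ⟨i, hi, hq, hle, hlt⟩
    have := pv_qb_imp l i hq
    exact ⟨i, by omega, hq, hle, hlt⟩

theorem pv_covB_false_of_short (l : List Char) (p : Nat) (h : l.length < 10) :
    pvCovB l p = false := by
  rw [Bool.eq_false_iff]
  intro hc
  simp only [pvCovB, pvCovPart, List.any_eq_true, List.mem_range, Bool.and_eq_true,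
    decide_eq_true_eq] at hc
  obtain ⟨i, -, hq, -⟩ := hc
  have := pv_qb_imp l i hq
  omega

theorem pv_spec_partial (l : List Char) : pvPartial l (l.length - 9) = pvSpecOut l := by
  unfold pvPartial pvSpecOut
  apply List.map_congr_left
  intro p _
  rw [pv_covPart_final]

theorem pv_A_eq_spec (flank : String) :
    mask_dinucleotides flank = String.ofList (pvSpecOut flank.toList) := by
  unfold mask_dinucleotides
  set l := flank.toList with hl
  change String.ofList ((PySem.List.pyRange 0 (PySem.List.len l - 5 * 2 + 1) 1).foldl (pvAStep l) l) =
    String.ofList (pvSpecOut l)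
  by_cases hn : 10 ≤ l.length
  · rw [show PySem.List.len l - 5 * 2 + 1 = ((l.length - 9 : Nat) : Int) from by
      simp only [PySem.List.len_eq]; omega]
    rw [pv_outer_fold l (l.length - 9) (by omega), pv_spec_partial]
  · rw [PySem.List.pyRange_one_eq_nil (by simp only [PySem.List.len_eq]; omega)]
    simp only [List.foldl_nil]
    congr 1
    unfold pvSpecOut
    conv_lhs => rw [← pv_map_getD_range l]
    apply List.map_congr_left
    intro p _
    rw [pv_covB_false_of_short l p (by omega)]
    simp

theorem pv_run_aux (l : List Char) (k : Nat) (hk : k + 3 ≤ l.length) :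
    (PySem.List.pyRange ((k : Int) - 1) (-1) (-1)).foldl (pvBStepRun l)
        ((List.range l.length).map (fun j => if k ≤ j then (pvCnt l j : Int) else 1)) =
      (List.range l.length).map (fun j => (pvCnt l j : Int)) := by
  induction k with
  | zero =>
    rw [show ((0 : Nat) : Int) - 1 = (-1 : Int) from by norm_num,
      PySem.List.pyRange_neg_one_eq_nil (le_refl _)]
    simp
  | succ k ih =>
    rw [show ((k + 1 : Nat) : Int) - 1 = (k : Int) from by push_cast; ring,
      PySem.List.pyRange_neg_one_cons (by omega), List.foldl_cons]
    have hk4 : k + 4 ≤ l.length := by omega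
    have hstep : pvBStepRun l
        ((List.range l.length).map (fun j => if k + 1 ≤ j then (pvCnt l j : Int) else 1)) (k : Int) =
        (List.range l.length).map (fun j => if k ≤ j then (pvCnt l j : Int) else 1) := by
      simp only [pvBStepRun, show (k : Int) + 1 = ((k + 1 : Nat) : Int) from by push_cast; ring,
        show (k : Int) + 2 = ((k + 2 : Nat) : Int) from by push_cast; ring,
        show (k : Int) + 3 = ((k + 3 : Nat) : Int) from by push_cast; ring,
        PySem.List.pyGetD_natCast, PySem.List.pySetD_natCast]
      by_cases hcond : l.getD k ' ' = l.getD (k + 2) ' ' ∧ l.getD (k + 1) ' ' = l.getD (k + 3) ' '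
      · rw [if_pos hcond]
        have hcnt : pvCnt l k = pvCnt l (k + 2) + 1 := by
          rw [pvCnt, dif_pos ⟨hk4, hcond⟩]
        have hget : ((List.range l.length).map
            (fun j => if k + 1 ≤ j then (pvCnt l j : Int) else 1)).getD (k + 2) 0 =
            (pvCnt l (k + 2) : Int) := by
          rw [pv_getD_map_range _ _ _ (by omega)]
          rw [if_pos (by omega)]
        rw [hget]
        apply List.ext_getElem
        · simp
        · intro q h1 h2
          simp only [List.getElem_set, List.getElem_map, List.getElem_range]
          by_cases hq : k = q
          · rw [if_pos hq, if_pos (by omega)]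
            rw [← hq, hcnt]
            push_cast
            ring
          · rw [if_neg hq]
            split_ifs <;> first | rfl | omega
      · rw [if_neg hcond]
        have hcnt : pvCnt l k = 1 := by
          rw [pvCnt, dif_neg (by tauto)]
        apply List.map_congr_left
        intro j _
        by_cases hj : k = j
        · rw [← hj, if_neg (by omega), if_pos (by omega), hcnt]
          norm_num
        · split_ifs <;> first | rfl | omega
    rw [hstep, ih (by omega)]

theorem pv_run_eq (l : List Char) :
    (PySem.List.pyRange ((l.length : Int) - 4) (-1) (-1)).foldl (pvBStepRun l)
        (List.replicate l.length (1 : Int)) =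
      (List.range l.length).map (fun j => (pvCnt l j : Int)) := by
  by_cases hn : 3 ≤ l.length
  · have hrep : List.replicate l.length (1 : Int) =
        (List.range l.length).map (fun j => if l.length - 3 ≤ j then (pvCnt l j : Int) else 1) := by
      apply List.ext_getElem
      · simp
      · intro q h1 h2
        simp only [List.getElem_replicate, List.getElem_map, List.getElem_range]
        split_ifs with hs
        · rw [pv_cnt_eq_one l q (by simp at h1; omega)]
          norm_num
        · rfl
    rw [show ((l.length : Int) - 4) = ((l.length - 3 : Nat) : Int) - 1 from by omega, hrep,
      pv_run_aux l (l.length - 3) (by omega)]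
  · rw [PySem.List.pyRange_neg_one_eq_nil (by omega), List.foldl_nil]
    apply List.ext_getElem
    · simp
    · intro q h1 h2
      simp only [List.getElem_replicate, List.getElem_map, List.getElem_range]
      rw [pv_cnt_eq_one l q (by simp at h1; omega)]
      norm_num

theorem pv_coverPre_lt (l : List Char) (m q : Nat) :
    q < pvCoverPre l m ↔ ∃ i, i < m ∧ pvQb l i = true ∧ q < i + 2 * pvCnt l i := by
  induction m with
  | zero => simp [pvCoverPre]
  | succ m ih =>
    by_cases hq : pvQb l m = true
    · simp only [pvCoverPre, hq, if_true, lt_max_iff, ih]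
      constructor
      · rintro (⟨i, h1, h2, h3⟩ | hlt)
        · exact ⟨i, by omega, h2, h3⟩
        · exact ⟨m, by omega, hq, hlt⟩
      · rintro ⟨i, h1, h2, h3⟩
        by_cases him : i = m
        · right; rw [← him]; exact h3
        · left; exact ⟨i, by omega, h2, h3⟩
    · have hq' : pvQb l m = false := by simpa using hq
      simp only [pvCoverPre, hq', Bool.false_eq_true, if_false, Nat.max_zero, ih]
      constructor
      · rintro ⟨i, h1, h2, h3⟩
        exact ⟨i, by omega, h2, h3⟩
      · rintro ⟨i, h1, h2, h3⟩
        by_cases him : i = m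
        · rw [him] at h2; rw [h2] at hq'; simp at hq'
        · exact ⟨i, by omega, h2, h3⟩

theorem pv_covB_iff (l : List Char) (p : Nat) :
    pvCovB l p = true ↔ ∃ i, i < p + 1 ∧ pvQb l i = true ∧ p < i + 2 * pvCnt l i := by
  simp only [pvCovB, pvCovPart, List.any_eq_true, List.mem_range, Bool.and_eq_true,
    decide_eq_true_eq]
  constructor
  · rintro ⟨i, h1, h2, -, h4⟩
    exact ⟨i, h1, h2, h4⟩
  · rintro ⟨i, h1, h2, h4⟩
    exact ⟨i, h1, h2, by omega, h4⟩

theorem pv_out_fold (l : List Char) (P : Nat) (hP : P ≤ l.length) :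
    (PySem.List.pyRange 0 (P : Int) 1).foldl
        (pvBStepOut l ((List.range l.length).map (fun j => (pvCnt l j : Int)))) ([], 0) =
      ((List.range P).map (fun p => if pvCovB l p then 'N' else l.getD p ' '),
        (pvCoverPre l P : Int)) := by
  induction P with
  | zero =>
    rw [show ((0 : Nat) : Int) = 0 from rfl, PySem.List.pyRange_one_eq_nil (le_refl _)]
    simp [pvCoverPre]
  | succ P ih =>
    rw [show ((P + 1 : Nat) : Int) = (P : Int) + 1 from by push_cast; ring,
      PySem.List.pyRange_one_succ_right (by positivity), List.foldl_append, ih (by omega),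
      List.foldl_cons, List.foldl_nil]
    have hP' : P < l.length := by omega
    simp only [pvBStepOut, PySem.List.len_eq,
      show (P : Int) + 1 = ((P + 1 : Nat) : Int) from by push_cast; ring,
      PySem.List.pyGetD_natCast]
    rw [pv_getD_map_range (fun j => (pvCnt l j : Int)) l.length P hP']
    have hcond : (((P + 1 : Nat) : Int) < (l.length : Int) ∧ 5 ≤ (pvCnt l P : Int) ∧
        l.getD P ' ' ≠ 'N' ∧ l.getD (P + 1) ' ' ≠ 'N') ↔ pvQb l P = true := by
      simp only [pvQb, decide_eq_true_eq]
      constructor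
      · rintro ⟨a, b, c2, d2⟩
        exact ⟨by omega, c2, d2, by exact_mod_cast b⟩
      · rintro ⟨a, b, c2, d2⟩
        exact ⟨by omega, by exact_mod_cast d2, b, c2⟩
    by_cases hqb : pvQb l P = true
    · rw [if_pos (hcond.mpr hqb)]
      have hcov : pvCoverPre l (P + 1) = max (pvCoverPre l P) (P + 2 * pvCnt l P) := by
        simp [pvCoverPre, hqb]
      have hcast : max ((pvCoverPre l P : Int)) ((P : Int) + 2 * (pvCnt l P : Int)) =
          ((pvCoverPre l (P + 1) : Nat) : Int) := by
        rw [hcov]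
        push_cast
        rfl
      rw [hcast]
      have hiff : ((P : Int) < ((pvCoverPre l (P + 1) : Nat) : Int)) ↔ pvCovB l P = true := by
        rw [Nat.cast_lt, pv_coverPre_lt, ← pv_covB_iff]
      simp only [Prod.mk.injEq]
      refine ⟨?_, trivial⟩
      rw [List.range_succ, List.map_append, List.map_cons, List.map_nil]
      congr 1
      simp only [hiff]
    · rw [if_neg (fun hc => hqb (hcond.mp hc))]
      have hq' : pvQb l P = false := by simpa using hqb
      have hcov : pvCoverPre l (P + 1) = pvCoverPre l P := by
        simp [pvCoverPre, hq']
      have hiff : ((P : Int) < ((pvCoverPre l P : Nat) : Int)) ↔ pvCovB l P = true := by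
        rw [Nat.cast_lt, ← hcov, pv_coverPre_lt, ← pv_covB_iff]
      simp only [Prod.mk.injEq]
      refine ⟨?_, by rw [hcov]⟩
      rw [List.range_succ, List.map_append, List.map_cons, List.map_nil]
      congr 1
      simp only [hiff]

theorem pv_B_eq_spec (flank : String) :
    mask_dinucleotides_alt flank = String.ofList (pvSpecOut flank.toList) := by
  unfold mask_dinucleotides_alt
  set l := flank.toList with hl
  change String.ofList ((PySem.List.pyRange 0 (PySem.List.len l) 1).foldl
      (pvBStepOut l ((PySem.List.pyRange (PySem.List.len l - 4) (-1) (-1)).foldl (pvBStepRun l)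
        (PySem.List.pyRepeat [(1 : Int)] (PySem.List.len l)))) ([], 0)).1 =
    String.ofList (pvSpecOut l)
  rw [show PySem.List.pyRepeat [(1 : Int)] (PySem.List.len l) = List.replicate l.length 1 from by
    rw [PySem.List.pyRepeat_singleton]
    simp [PySem.List.len_eq]]
  simp only [PySem.List.len_eq]
  rw [pv_run_eq, pv_out_fold l l.length (le_refl _)]
  rfl

-- ===== VERDICT (by name: the statement is the Claim_ definition above) =====
theorem mask_dinucleotides_spec : Claim_equal_mask_dinucleotides := by
  intro flank _
  unfold Spec_mask_dinucleotides
  rw [pv_A_eq_spec, pv_B_eq_spec]
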